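-- pv_equiv track=rewrite | github.com/leonardobilhalva/Artificial_Intelligence_First_Assignment_INF01048 | trabalho ia.py | entrada_valida
-- ===== SOURCE A (Python) =====
-- def entrada_valida(tabuleiro):
--     aux_entrada = "12345678_"
--     teste = False
--     if len(tabuleiro) != 9:  # testo se a entrada tem o tamanho correto, ja que sempre tera tamanho = 9
--         return False
--     else:
--         for caracter_aux in aux_entrada:  # testo se a entrada contem todos caracteres corretos, não importa a ordem
--             for caracter_entrada in tabuleiro:
--                 if teste == False:
--                     if caracter_aux == caracter_entrada:
--                         teste = True
--             if caracter_aux == "_":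
--                 return teste
--             elif teste == False:
--                 return teste
--             else:
--                 teste = False
--     return teste
-- ===== SOURCE B (Python) =====
-- def entrada_valida(tabuleiro):
--     return len(tabuleiro) == 9 and set(tabuleiro) == set("12345678_")
-- ===== Notes on version B (the rewrite author's own statement) =====
-- stated objective: simpler
-- what changed: Replaces the nested per-required-character rescans of the input with a single set construction compared for equality against the set of the nine required characters, valid because the fixed length 9 makes containment of the nine distinct required characters equivalent to set equality.
import Mathlib
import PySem

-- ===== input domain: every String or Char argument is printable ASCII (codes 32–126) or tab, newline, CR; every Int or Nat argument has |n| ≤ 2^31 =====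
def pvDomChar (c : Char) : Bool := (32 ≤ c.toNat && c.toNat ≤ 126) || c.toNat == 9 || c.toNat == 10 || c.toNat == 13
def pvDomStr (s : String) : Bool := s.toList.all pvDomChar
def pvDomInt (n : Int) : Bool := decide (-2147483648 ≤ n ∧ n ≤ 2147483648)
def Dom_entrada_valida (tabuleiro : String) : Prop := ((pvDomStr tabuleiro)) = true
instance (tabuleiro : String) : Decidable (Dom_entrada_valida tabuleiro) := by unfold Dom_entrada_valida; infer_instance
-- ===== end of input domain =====

-- B replaces A's nested per-required-character rescans by one set construction compared for equality (simpler).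

-- ===== PORT A =====
-- inner loop: for caracter_entrada in tabuleiro: if teste == False: if caracter_aux == caracter_entrada: teste = True
def pvScanA (tab : List Char) (a : Char) (teste : Bool) : Bool :=
  tab.foldl (fun t c => if t == false then (if a == c then true else t) else t) teste

-- outer loop over aux_entrada with A's early returns
def pvOuterA (aux : List Char) (tab : List Char) (teste : Bool) : Bool :=
  match aux with
  | [] => teste
  | a :: rest =>
    let t := pvScanA tab a teste
    if a == '_' then t
    else if t == false then t
    else pvOuterA rest tab false

def entrada_valida (tabuleiro : String) : Bool :=
  if PySem.Str.len tabuleiro != 9 then false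
  else pvOuterA "12345678_".toList tabuleiro.toList false

-- ===== PORT B =====
def entrada_valida_alt (tabuleiro : String) : Bool :=
  PySem.Str.len tabuleiro == 9 &&
    PySem.Set.equal (PySem.Set.ofList tabuleiro.toList) (PySem.Set.ofList "12345678_".toList)

-- ===== PRECONDITION & SPEC =====
def Spec_entrada_valida (tabuleiro : String) (out : Bool) : Prop := out = entrada_valida_alt tabuleiro
instance (tabuleiro : String) (out : Bool) : Decidable (Spec_entrada_valida tabuleiro out) := by unfold Spec_entrada_valida; infer_instance

-- ===== CLAIM (what is proved, stated in full; the proofs are below) =====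
def Claim_equal_entrada_valida : Prop := ∀ (tabuleiro : String), Dom_entrada_valida tabuleiro → Spec_entrada_valida tabuleiro (entrada_valida tabuleiro)

-- ===== LEMMAS AND PROOFS =====

lemma pv_foldl_true (a : Char) (cs : List Char) :
    List.foldl (fun t c => if t = false then decide (a = c) || t else t) true cs = true := by
  induction cs with
  | nil => rfl
  | cons d ds ih => simpa using ih

lemma pvScanA_true (tab : List Char) (a : Char) : pvScanA tab a true = true := by
  simpa [pvScanA] using pv_foldl_true a tab

-- A's inner scan sets teste iff the required char occurs in the input
lemma pvScanA_eq (tab : List Char) (a : Char) (teste : Bool) :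
    pvScanA tab a teste = (teste || tab.contains a) := by
  induction tab generalizing teste with
  | nil => simp [pvScanA]
  | cons c cs ih =>
    cases teste
    · by_cases h : a = c
      · simp [pvScanA, h, pv_foldl_true]
      · simpa [pvScanA, List.foldl_cons, h, BEq.comm, Bool.false_or] using ih false
    · simp [pvScanA_true]

-- A's outer loop on the concrete aux string is the conjunction of the nine containment tests
lemma outerA_eq (tab : List Char) :
    pvOuterA ['1','2','3','4','5','6','7','8','_'] tab false =
      (tab.contains '1' && tab.contains '2' && tab.contains '3' && tab.contains '4' &&
       tab.contains '5' && tab.contains '6' && tab.contains '7' && tab.contains '8' &&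
       tab.contains '_') := by
  simp only [pvOuterA, pvScanA_eq, Bool.false_or]
  cases tab.contains '1' <;> cases tab.contains '2' <;> cases tab.contains '3' <;>
    cases tab.contains '4' <;> cases tab.contains '5' <;> cases tab.contains '6' <;>
    cases tab.contains '7' <;> cases tab.contains '8' <;> cases tab.contains '_' <;> rfl

-- pigeonhole: a 9-char string containing the 9 distinct required chars has exactly their set
lemma pv_main (tab : List Char) (h : tab.length = 9)
    (hsub : ∀ c ∈ (['1','2','3','4','5','6','7','8','_'] : List Char), c ∈ tab) :
    ∀ x, x ∈ tab ↔ x ∈ (['1','2','3','4','5','6','7','8','_'] : List Char) := by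
  have hsub' : (['1','2','3','4','5','6','7','8','_'] : List Char).toFinset ⊆ tab.toFinset := by
    intro x hx
    simp only [List.mem_toFinset] at *
    exact hsub x hx
  have hcard : tab.toFinset.card ≤ (['1','2','3','4','5','6','7','8','_'] : List Char).toFinset.card := by
    have h1 : tab.toFinset.card ≤ tab.length := tab.toFinset_card_le
    have h2 : (['1','2','3','4','5','6','7','8','_'] : List Char).toFinset.card = 9 := by decide
    omega
  have heq := Finset.eq_of_subset_of_card_le hsub' hcard
  intro x
  constructor
  · intro hx
    have : x ∈ tab.toFinset := List.mem_toFinset.mpr hx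
    rw [← heq] at this
    exact List.mem_toFinset.mp this
  · intro hx; exact hsub x hx

theorem pv_equiv (tabuleiro : String) :
    entrada_valida tabuleiro = entrada_valida_alt tabuleiro := by
  unfold entrada_valida entrada_valida_alt
  have hreq : "12345678_".toList = (['1','2','3','4','5','6','7','8','_'] : List Char) := rfl
  by_cases hlen : PySem.Str.len tabuleiro = 9
  · have h9 : tabuleiro.toList.length = 9 := by
      have := PySem.Str.len_eq tabuleiro; omega
    rw [hreq]
    simp only [hlen, bne_self_eq_false, Bool.false_eq_true, if_false, BEq.refl, Bool.true_and,
      outerA_eq]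
    rw [Bool.eq_iff_iff, PySem.Set.equal_iff]
    simp only [Bool.and_eq_true, List.contains_iff_mem, PySem.Set.mem_ofList]
    constructor
    · rintro ⟨⟨⟨⟨⟨⟨⟨⟨h1, h2⟩, h3⟩, h4⟩, h5⟩, h6⟩, h7⟩, h8⟩, hu⟩
      exact pv_main tabuleiro.toList h9 (by
        intro c hc; fin_cases hc <;> assumption)
    · intro hiff
      refine ⟨⟨⟨⟨⟨⟨⟨⟨?_, ?_⟩, ?_⟩, ?_⟩, ?_⟩, ?_⟩, ?_⟩, ?_⟩, ?_⟩ <;>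
        (apply (hiff _).mpr; decide)
  · rw [PySem.Str.len_eq, String.length_toList] at hlen
    simp [hlen]

-- ===== VERDICT (by name: the statement is the Claim_ definition above) =====
theorem entrada_valida_spec : Claim_equal_entrada_valida := by
  intro tabuleiro _
  unfold Spec_entrada_valida
  exact pv_equiv tabuleiro
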